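-- pv_equiv track=rewrite | github.com/MichalBroucek/project_mysites | news/views.py | __get_previous_image_id
-- ===== SOURCE A (Python) =====
-- def __get_previous_image_id(obr_id, new_picture_id_list):
--     """
--     Return reguested image
--     :return:
--     """
--     try:
--         actual_id = int(obr_id)  # Exception ?
--     except ValueError:
--         actual_id = 0
--
--     previous_id = None
--     if actual_id - 1 <= 0:
--         previous_id = new_picture_id_list[-1]  # Last in the list
--     else:
--         previous_id_flag = False  # True if next item in reversed list is next picture ID
--         for id in reversed(new_picture_id_list):
--
--             if previous_id_flag:  # next item in the reversed list is the previous picture id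
--                 previous_id = id
--                 break
--
--             if id == actual_id:  # This item is actual picture (next iteration is next picture ID)
--                 previous_id_flag = True
--
--     return previous_id
-- ===== SOURCE B (Python) =====
-- def __get_previous_image_id(obr_id, new_picture_id_list):
--     """Single forward pass: build a predecessor map, then one lookup."""
--     try:
--         actual_id = int(obr_id)
--     except ValueError:
--         actual_id = 0
--
--     if actual_id <= 1:
--         return new_picture_id_list[-1]
--
--     prev_map = {}
--     prev = None
--     for id in new_picture_id_list:
--         prev_map[id] = prev
--         prev = id
--     return prev_map.get(actual_id)
-- ===== Notes on version B (the rewrite author's own statement) =====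
-- stated objective: idiomatic
-- what changed: The reverse flag-scan is replaced by one forward pass that builds a predecessor map (later duplicates overwrite, reproducing the last-occurrence semantics) followed by a single dict lookup.
import Mathlib
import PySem

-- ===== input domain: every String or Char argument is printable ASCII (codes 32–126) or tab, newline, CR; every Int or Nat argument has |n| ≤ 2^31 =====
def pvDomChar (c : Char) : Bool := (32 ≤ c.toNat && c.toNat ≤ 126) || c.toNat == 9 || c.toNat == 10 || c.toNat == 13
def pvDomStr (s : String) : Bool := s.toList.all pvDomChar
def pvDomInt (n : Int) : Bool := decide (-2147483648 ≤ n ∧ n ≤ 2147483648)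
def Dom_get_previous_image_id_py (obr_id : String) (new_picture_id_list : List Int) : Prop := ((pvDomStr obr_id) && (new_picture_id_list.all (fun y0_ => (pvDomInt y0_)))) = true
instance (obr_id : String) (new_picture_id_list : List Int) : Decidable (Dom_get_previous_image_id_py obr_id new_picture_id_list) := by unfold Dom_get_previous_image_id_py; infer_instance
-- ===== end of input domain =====

-- B replaces A's reverse flag-scan by one forward pass building a predecessor map, then a lookup (idiomatic; same cost).

-- ===== PORT A =====
-- the reversed-list flag loop of A, step for step
def pvLoopA (actual : Int) : List Int → Bool → Option Int
  | [], _ => none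
  | id :: rest, flag =>
    if flag then some id
    else pvLoopA actual rest (id == actual)

def get_previous_image_id_py (obr_id : String) (new_picture_id_list : List Int) : Option Int :=
  let actual_id := (PySem.Int.ofStr? obr_id).getD 0
  if actual_id - 1 ≤ 0 then
    PySem.List.pyGet? new_picture_id_list (-1)   -- Pre_ guarantees the list is nonempty here (IndexError otherwise)
  else
    pvLoopA actual_id new_picture_id_list.reverse false

-- ===== PORT B =====
-- forward pass: prev_map[id] = prev; prev = id
def pvBuild (l : List Int) : PySem.Dict Int (Option Int) × Option Int :=
  l.foldl (fun st id => (st.1.insert id st.2, some id)) (PySem.Dict.empty, none)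

def get_previous_image_id_py_alt (obr_id : String) (new_picture_id_list : List Int) : Option Int :=
  let actual_id := (PySem.Int.ofStr? obr_id).getD 0
  if actual_id ≤ 1 then
    PySem.List.pyGet? new_picture_id_list (-1)
  else
    match (pvBuild new_picture_id_list).1.get? actual_id with
    | some v => v      -- prev_map.get(actual_id) returns the stored (possibly None) predecessor
    | none => none

-- ===== PRECONDITION & SPEC =====
-- Pre_ excludes exactly the inputs where A raises IndexError: parsed id ≤ 1 with an empty list.
def Pre_get_previous_image_id_py (obr_id : String) (new_picture_id_list : List Int) : Prop :=
  (PySem.Int.ofStr? obr_id).getD 0 ≤ 1 → new_picture_id_list ≠ []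
instance (obr_id : String) (new_picture_id_list : List Int) : Decidable (Pre_get_previous_image_id_py obr_id new_picture_id_list) := by unfold Pre_get_previous_image_id_py; infer_instance
def pvWitness_get_previous_image_id_py : String × List Int := ("2", [1, 2, 3])

def Spec_get_previous_image_id_py (obr_id : String) (new_picture_id_list : List Int) (out : Option Int) : Prop := out = get_previous_image_id_py_alt obr_id new_picture_id_list
instance (obr_id : String) (new_picture_id_list : List Int) (out : Option Int) : Decidable (Spec_get_previous_image_id_py obr_id new_picture_id_list out) := by unfold Spec_get_previous_image_id_py; infer_instance

-- ===== CLAIM (what is proved, stated in full; the proofs are below) =====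
def Claim_equal_get_previous_image_id_py : Prop := ∀ (obr_id : String) (new_picture_id_list : List Int), Dom_get_previous_image_id_py obr_id new_picture_id_list → Pre_get_previous_image_id_py obr_id new_picture_id_list → Spec_get_previous_image_id_py obr_id new_picture_id_list (get_previous_image_id_py obr_id new_picture_id_list)

-- ===== LEMMAS AND PROOFS =====

-- the tracked 'prev' after the forward pass
theorem pvBuild_snd_aux (l : List Int) (st : PySem.Dict Int (Option Int) × Option Int) :
    (l.foldl (fun st id => (st.1.insert id st.2, some id)) st).2
      = match l.getLast? with | none => st.2 | some x => some x := by
  induction l generalizing st with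
  | nil => rfl
  | cons x xs ih =>
    rw [List.foldl_cons, ih]
    cases xs with
    | nil => rfl
    | cons y ys =>
      cases h : (y :: ys).getLast? with
      | none => simp at h
      | some z => simp [List.getLast?_cons_cons, h]

-- the tracked 'prev' after the forward pass is the last element
theorem pvBuild_snd (l : List Int) : (pvBuild l).2 = l.getLast? := by
  rw [pvBuild, pvBuild_snd_aux]
  cases h : l.getLast? <;> simp

theorem pvBuild_append (l : List Int) (x : Int) :
    pvBuild (l ++ [x]) = ((pvBuild l).1.insert x (pvBuild l).2, some x) := by
  simp [pvBuild, List.foldl_append]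

-- A's loop with the flag already set returns the next (head) element
theorem pvLoopA_true (actual : Int) (r : List Int) : pvLoopA actual r true = r.head? := by
  cases r <;> rfl

-- main correspondence between the reversed flag-scan and the predecessor map
theorem pv_main (actual : Int) (l : List Int) :
    pvLoopA actual l.reverse false
      = (match (pvBuild l).1.get? actual with | some v => v | none => none) := by
  induction l using List.reverseRecOn with
  | nil => rfl
  | append_singleton l x ih =>
    rw [List.reverse_append, pvBuild_append]
    by_cases hx : actual = x
    · subst hx
      simp only [List.reverse_singleton, List.singleton_append, pvLoopA, if_neg Bool.false_ne_true,
        BEq.rfl, pvLoopA_true, PySem.Dict.get?_insert_self, List.head?_reverse, pvBuild_snd]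
    · have hb : (x == actual) = false := by simp [Ne.symm hx]
      simp only [List.reverse_singleton, List.singleton_append, pvLoopA, if_neg Bool.false_ne_true,
        hb, PySem.Dict.get?_insert_of_ne _ _ hx, ih]

-- ===== VERDICT (by name: the statement is the Claim_ definition above) =====
theorem get_previous_image_id_py_spec : Claim_equal_get_previous_image_id_py := by
  intro obr_id l _ hpre
  unfold Spec_get_previous_image_id_py get_previous_image_id_py get_previous_image_id_py_alt
  set a := (PySem.Int.ofStr? obr_id).getD 0 with ha
  by_cases h : a ≤ 1
  · simp [h, show a - 1 ≤ 0 by omega]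
  · simp only [h, show ¬ a - 1 ≤ 0 by omega]
    simpa using pv_main a l
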